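-- pv_equiv track=rewrite | github.com/svend4/meta | projects/hexglyph/solan_segment.py | spatial_segments
-- ===== SOURCE A (Python) =====
-- def spatial_segments(state: tuple[int, ...] | list[int]) -> list[tuple[int, int]]:
--     """Return the list of (value, length) pairs for spatial segments on the ring.
--
--     A spatial segment is a maximal circular arc of consecutive cells with the
--     same Q6 value.  The ring is periodic: cell N−1 is adjacent to cell 0.
--
--     If the ring is uniform (all cells equal), returns [(value, N)].
--     Otherwise, the returned list has length equal to n_active_boundaries
--     (solan_boundary) and the sum of lengths equals N.
--     """
--     N = len(state)
--     walls = [i for i in range(N) if state[i] != state[(i + 1) % N]]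
--     if not walls:
--         return [(int(state[0]), N)]
--     segs: list[tuple[int, int]] = []
--     nw = len(walls)
--     for k in range(nw):
--         start  = (walls[k] + 1) % N
--         end    = walls[(k + 1) % nw]
--         length = (end - start + 1) if end >= start else (N - start + end + 1)
--         segs.append((int(state[start]), length))
--     return segs
-- ===== SOURCE B (Python) =====
-- def spatial_segments(state):
--     N = len(state)
--     p = next((i for i in range(N) if state[i] != state[(i + 1) % N]), None)
--     if p is None:
--         return [(int(state[0]), N)]
--     r = state[p + 1:] + state[:p + 1]
--     segs = []
--     v, run = r[0], 1
--     for x in r[1:]: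
--         if x == v:
--             run += 1
--         else:
--             segs.append((int(v), run))
--             v, run = x, 1
--     segs.append((int(v), run))
--     return segs
-- ===== Notes on version B (the rewrite author's own statement) =====
-- stated objective: simpler
-- what changed: A builds the full list of circular boundary positions and then derives each segment by modular index subtraction between consecutive walls; B finds only the first boundary, rotates the ring to start just after it, and accumulates (value, run-length) pairs in one linear sweep.
import Mathlib
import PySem

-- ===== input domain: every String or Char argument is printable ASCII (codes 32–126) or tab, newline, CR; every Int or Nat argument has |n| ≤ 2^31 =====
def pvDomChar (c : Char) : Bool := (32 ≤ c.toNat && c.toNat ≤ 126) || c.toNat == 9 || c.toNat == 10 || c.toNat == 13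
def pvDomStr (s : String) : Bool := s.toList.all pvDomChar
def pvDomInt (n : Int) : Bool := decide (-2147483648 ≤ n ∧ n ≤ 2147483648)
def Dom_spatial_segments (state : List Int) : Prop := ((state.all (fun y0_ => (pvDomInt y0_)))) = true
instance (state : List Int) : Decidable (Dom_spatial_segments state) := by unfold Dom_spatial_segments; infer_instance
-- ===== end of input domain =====

-- B replaces A's two-phase walls-list + index-subtraction with a rotate-to-first-boundary and a single
-- linear run-accumulating sweep (objective: simpler; same O(N) cost).

-- ===== PORT A =====
def spatial_segments (state : List Int) : List (Int × Int) :=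
  let N : Int := state.length
  let walls : List Int := (PySem.List.pyRange 0 N 1).filter
    (fun i => decide (PySem.List.pyGet? state i ≠ PySem.List.pyGet? state (PySem.Int.mod (i + 1) N)))
  if walls = [] then
    match state with
    | [] => []    -- Python raises IndexError on state[0]; excluded by Pre_
    | x :: _ => [(x, N)]
  else
    let nw : Int := walls.length
    (PySem.List.pyRange 0 nw 1).foldl (fun segs k =>
      let start := PySem.Int.mod (PySem.List.pyGetD walls k 0 + 1) N
      let fin := PySem.List.pyGetD walls (PySem.Int.mod (k + 1) nw) 0
      let len := if fin ≥ start then fin - start + 1 else N - start + fin + 1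
      segs ++ [(PySem.List.pyGetD state start 0, len)]) []

-- ===== PORT B =====
def runsLoop : List Int → Int → Int → List (Int × Int) → List (Int × Int)
  | [], v, run, segs => segs ++ [(v, run)]
  | x :: xs, v, run, segs =>
    if x = v then runsLoop xs v (run + 1) segs
    else runsLoop xs x 1 (segs ++ [(v, run)])

def spatial_segments_alt (state : List Int) : List (Int × Int) :=
  let N : Int := state.length
  match (PySem.List.pyRange 0 N 1).find?
      (fun i => decide (PySem.List.pyGet? state i ≠ PySem.List.pyGet? state (PySem.Int.mod (i + 1) N))) with
  | none =>
    match state with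
    | [] => []    -- Python raises IndexError on state[0]; excluded by Pre_
    | x :: _ => [(x, N)]
  | some p =>
    let r := PySem.List.slice state (some (p + 1)) none ++ PySem.List.slice state none (some (p + 1))
    match r with
    | [] => []    -- unreachable: r always has length N ≥ 1 here
    | v :: rest => runsLoop rest v 1 []

-- ===== PRECONDITION & SPEC =====
-- Pre_ excludes only the empty list, on which A raises IndexError (state[0]).
def Pre_spatial_segments (state : List Int) : Prop := state ≠ []
instance (state : List Int) : Decidable (Pre_spatial_segments state) := by
  unfold Pre_spatial_segments; infer_instance

def pvWitness_spatial_segments : List Int := [1, 1, 2]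

def Spec_spatial_segments (state : List Int) (out : List (Int × Int)) : Prop := out = spatial_segments_alt state
instance (state : List Int) (out : List (Int × Int)) : Decidable (Spec_spatial_segments state out) := by
  unfold Spec_spatial_segments; infer_instance

-- ===== CLAIM (what is proved, stated in full; the proofs are below) =====
def Claim_equal_spatial_segments : Prop := ∀ (state : List Int), Dom_spatial_segments state → Pre_spatial_segments state → Spec_spatial_segments state (spatial_segments state)

-- ===== LEMMAS AND PROOFS =====

-- circular wall predicate and the wall list, in Nat form
def wallB (s : List Int) (i : Nat) : Bool :=
  decide (s.getD i 0 ≠ s.getD ((i + 1) % s.length) 0)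

def cw (s : List Int) : List Nat := (List.range s.length).filter (wallB s)

-- the ring rotated to start just after wall p
def rotA (s : List Int) (p : Nat) : List Int := s.drop (p + 1) ++ s.take (p + 1)

-- one segment of A, in Nat wall coordinates
def blockf (s : List Int) (a b : Nat) : Int × Int :=
  let N : Int := s.length
  let st : Nat := (a + 1) % s.length
  (s.getD st 0, if (b : Int) ≥ (st : Int) then (b : Int) - st + 1 else N - st + (b : Int) + 1)

-- A's segment list as a recursion over the walls after p
def ablocks (s : List Int) (p : Nat) : Nat → List Nat → List (Int × Int)
  | prev, [] => [blockf s prev p]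
  | prev, w :: t => blockf s prev w :: ablocks s p w t

def flatB (L : List (Int × Int)) : List Int :=
  L.flatMap (fun b => List.replicate b.2.toNat b.1)

-- ---- generic list facts ----
lemma find?_eq_head?_filter {α : Type} (q : α → Bool) (l : List α) :
    l.find? q = (l.filter q).head? := by
  induction l with
  | nil => rfl
  | cons x t ih =>
    rw [List.find?_cons, List.filter_cons]
    cases h : q x
    · rw [if_neg (by simp), ih]
    · rw [if_pos rfl]
      simp

-- ---- decomposition uniqueness ----
lemma flatB_head (v : Int) {n : Int} (hn : 1 ≤ n) (t : List (Int × Int)) :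
    (flatB ((v, n) :: t)).head? = some v := by
  have h1 : 1 ≤ n.toNat := by omega
  obtain ⟨m, hm⟩ : ∃ m, n.toNat = m + 1 := ⟨n.toNat - 1, by omega⟩
  simp [flatB, hm, List.replicate_succ]

lemma flatB_cons (v n : Int) (t : List (Int × Int)) :
    flatB ((v, n) :: t) = List.replicate n.toNat v ++ flatB t := by
  simp [flatB]

-- if the two decompositions share the value v but the first block of the first is shorter, contradiction
lemma decomp_aux {v n1 n2 : Int} {t1 t2 : List (Int × Int)}
    (hc1 : ((v, n1) :: t1).IsChain (fun a b => a.1 ≠ b.1))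
    (hp1 : ∀ b ∈ (v, n1) :: t1, 1 ≤ b.2) (_hp2 : ∀ b ∈ (v, n2) :: t2, 1 ≤ b.2)
    (heq : flatB ((v, n1) :: t1) = flatB ((v, n2) :: t2))
    (hlt : n1.toNat < n2.toNat) : False := by
  rw [flatB_cons, flatB_cons] at heq
  have hdrop := congrArg (List.drop n1.toNat) heq
  have hL : (List.replicate n1.toNat v ++ flatB t1).drop n1.toNat = flatB t1 := by
    rw [List.drop_append, List.drop_replicate]
    simp
  have h00 : n1.toNat - n2.toNat = 0 := by omega
  have hR : (List.replicate n2.toNat v ++ flatB t2).drop n1.toNat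
      = List.replicate (n2.toNat - n1.toNat) v ++ flatB t2 := by
    rw [List.drop_append, List.drop_replicate,
      show n1.toNat - (List.replicate n2.toNat v).length = 0 from by simpa using h00,
      List.drop_zero]
  rw [hL, hR] at hdrop
  have hd1 : 1 ≤ n2.toNat - n1.toNat := by omega
  obtain ⟨m, hm⟩ : ∃ m, n2.toNat - n1.toNat = m + 1 := ⟨n2.toNat - n1.toNat - 1, by omega⟩
  rw [hm, List.replicate_succ] at hdrop
  cases t1 with
  | nil => simp [flatB] at hdrop
  | cons b t1' =>
    have hb1 : (1 : Int) ≤ b.2 := hp1 b (by simp)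
    have hne := (List.isChain_cons.1 hc1).1 b rfl
    have hhd : (flatB (b :: t1')).head? = some b.1 := by
      obtain ⟨bv, bn⟩ := b
      exact flatB_head bv hb1 t1'
    rw [hdrop] at hhd
    simp at hhd
    simp only at hne
    exact hne hhd

lemma decomp_unique : ∀ (L1 L2 : List (Int × Int)),
    L1.IsChain (fun a b => a.1 ≠ b.1) → L2.IsChain (fun a b => a.1 ≠ b.1) →
    (∀ b ∈ L1, 1 ≤ b.2) → (∀ b ∈ L2, 1 ≤ b.2) →
    flatB L1 = flatB L2 → L1 = L2 := by
  intro L1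
  induction L1 with
  | nil =>
    intro L2 _ _ _ hp2 heq
    cases L2 with
    | nil => rfl
    | cons b t =>
      obtain ⟨bv, bn⟩ := b
      have := flatB_head bv (show (1 : Int) ≤ bn by simpa using hp2 (bv, bn) (by simp)) t
      rw [← heq] at this
      simp [flatB] at this
  | cons b1 t1 ih =>
    intro L2 hc1 hc2 hp1 hp2 heq
    obtain ⟨v1, n1⟩ := b1
    cases L2 with
    | nil =>
      have := flatB_head v1 (show (1 : Int) ≤ n1 by simpa using hp1 (v1, n1) (by simp)) t1
      rw [heq] at this
      simp [flatB] at this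
    | cons b2 t2 =>
      obtain ⟨v2, n2⟩ := b2
      have hv : v1 = v2 := by
        have h1 := flatB_head v1 (show (1 : Int) ≤ n1 by simpa using hp1 (v1, n1) (by simp)) t1
        have h2 := flatB_head v2 (show (1 : Int) ≤ n2 by simpa using hp2 (v2, n2) (by simp)) t2
        rw [heq] at h1
        rw [h1] at h2
        exact Option.some_inj.1 h2
      subst hv
      have hn : n1 = n2 := by
        rcases Nat.lt_trichotomy n1.toNat n2.toNat with h | h | h
        · exact absurd (decomp_aux hc1 hp1 hp2 heq h) not_false
        · have h1 := hp1 (v1, n1) (by simp)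
          have h2 := hp2 (v1, n2) (by simp)
          simp at h1 h2
          omega
        · exact absurd (decomp_aux hc2 hp2 hp1 heq.symm h) not_false
      subst hn
      have ht : flatB t1 = flatB t2 := by
        rw [flatB_cons, flatB_cons] at heq
        exact List.append_cancel_left heq
      have := ih t2 (List.isChain_cons.1 hc1).2 (List.isChain_cons.1 hc2).2
        (fun b hb => hp1 b (by simp [hb])) (fun b hb => hp2 b (by simp [hb])) ht
      rw [this]

-- ---- runsLoop facts ----
lemma runsLoop_acc (xs : List Int) : ∀ (v n : Int) (segs : List (Int × Int)),
    runsLoop xs v n segs = segs ++ runsLoop xs v n [] := by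
  induction xs with
  | nil => intro v n segs; simp [runsLoop]
  | cons x t ih =>
    intro v n segs
    by_cases h : x = v
    · simp [runsLoop, h, ih v (n + 1) segs]
    · rw [runsLoop, runsLoop, if_neg h, if_neg h, ih x 1 (segs ++ [(v, n)]),
        ih x 1 ([] ++ [(v, n)])]
      simp

lemma runsLoop_flat (xs : List Int) : ∀ (v n : Int), 1 ≤ n →
    flatB (runsLoop xs v n []) = List.replicate n.toNat v ++ xs := by
  induction xs with
  | nil => intro v n _; simp [runsLoop, flatB]
  | cons x t ih =>
    intro v n hn
    by_cases h : x = v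
    · rw [runsLoop, if_pos h, ih v (n + 1) (by omega)]
      have : (n + 1).toNat = n.toNat + 1 := by omega
      rw [this, List.replicate_succ']
      simp [h]
    · rw [runsLoop, if_neg h, runsLoop_acc, flatB, List.flatMap_append]
      have := ih x 1 (by omega)
      rw [flatB] at this
      rw [this]
      simp

lemma runsLoop_head (xs : List Int) : ∀ (v n : Int),
    (runsLoop xs v n []).head?.map Prod.fst = some v := by
  induction xs with
  | nil => intro v n; simp [runsLoop]
  | cons x t ih =>
    intro v n
    by_cases h : x = v
    · rw [runsLoop, if_pos h]; exact ih v (n + 1)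
    · rw [runsLoop, if_neg h, runsLoop_acc]; simp

lemma runsLoop_chain (xs : List Int) : ∀ (v n : Int),
    (runsLoop xs v n []).IsChain (fun a b => a.1 ≠ b.1) := by
  induction xs with
  | nil => intro v n; simp [runsLoop]
  | cons x t ih =>
    intro v n
    by_cases h : x = v
    · rw [runsLoop, if_pos h]; exact ih v (n + 1)
    · rw [runsLoop, if_neg h, runsLoop_acc, List.nil_append, List.singleton_append]
      refine (ih x 1).cons ?_
      intro y hy
      have hh := runsLoop_head t x 1
      intro hvy
      rw [hy] at hh
      simp at hh
      simp only [← hh] at h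
      exact h hvy.symm

lemma runsLoop_pos (xs : List Int) : ∀ (v n : Int), 1 ≤ n →
    ∀ b ∈ runsLoop xs v n [], 1 ≤ b.2 := by
  induction xs with
  | nil => intro v n hn b hb; simp [runsLoop] at hb; simp [hb, hn]
  | cons x t ih =>
    intro v n hn b hb
    by_cases h : x = v
    · rw [runsLoop, if_pos h] at hb; exact ih v (n + 1) (by omega) b hb
    · rw [runsLoop, if_neg h, runsLoop_acc] at hb
      rcases List.mem_append.1 hb with hb | hb
      · simp at hb; simp [hb, hn]
      · exact ih x 1 (by omega) b hb

-- ---- constancy on a wall-free stretch ----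
lemma constEq (r : List Int) (a b : Nat)
    (hconst : ∀ j, a ≤ j → j + 1 < b → r.getD j 0 = r.getD (j + 1) 0) :
    ∀ j, a ≤ j → j < b → r.getD j 0 = r.getD a 0 := by
  intro j
  induction j with
  | zero => intro h _; have : a = 0 := by omega
            rw [this]
  | succ k ihk =>
    intro hak hkb
    rcases Nat.lt_or_ge a (k + 1) with hlt | hge
    · have hak' : a ≤ k := by omega
      rw [← hconst k hak' hkb]
      exact ihk hak' (by omega)
    · have : a = k + 1 := by omega
      rw [this]

lemma dropRepl (r : List Int) : ∀ (a b : Nat), a ≤ b → b ≤ r.length →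
    (∀ j, a ≤ j → j + 1 < b → r.getD j 0 = r.getD (j + 1) 0) →
    r.drop a = List.replicate (b - a) (r.getD a 0) ++ r.drop b := by
  intro a b hab hbN hconst
  obtain ⟨n, hn⟩ : ∃ n, b - a = n := ⟨b - a, rfl⟩
  induction n generalizing a with
  | zero =>
    have : a = b := by omega
    simp [this]
  | succ m ihm =>
    have haN : a < r.length := by omega
    rw [List.drop_eq_getElem_cons haN]
    have hrepl : b - (a + 1) = m := by omega
    have ih := ihm (a + 1) (by omega)
      (fun j hj hjb => hconst j (by omega) hjb) hrepl
    rw [ih]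
    have hga : r.getD a 0 = r[a] := by
      simp [List.getD_eq_getElem?_getD, List.getElem?_eq_getElem haN]
    have hvals : List.replicate (b - (a + 1)) (r.getD (a + 1) 0)
        = List.replicate (b - (a + 1)) (r.getD a 0) := by
      by_cases hc : a + 1 < b
      · rw [hconst a (le_refl a) hc]
      · have h0 : b - (a + 1) = 0 := by omega
        simp [h0]
    rw [hvals, show b - a = (b - (a + 1)) + 1 from by omega, List.replicate_succ]
    simp [List.getElem?_eq_getElem haN]

-- ---- rotation access ----
lemma rotA_length (s : List Int) (p : Nat) (hp : p < s.length) :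
    (rotA s p).length = s.length := by
  simp [rotA]; omega

lemma rotA_getD (s : List Int) (p : Nat) (hp : p < s.length) (j : Nat) (hj : j < s.length) :
    (rotA s p).getD j 0 = s.getD ((p + 1 + j) % s.length) 0 := by
  have hlen : (s.drop (p + 1)).length = s.length - (p + 1) := by simp
  rw [rotA, List.getD_eq_getElem?_getD, List.getD_eq_getElem?_getD]
  rcases Nat.lt_or_ge j (s.length - (p + 1)) with hj1 | hj1
  · rw [List.getElem?_append_left (by omega), List.getElem?_drop]
    rw [Nat.mod_eq_of_lt (by omega)]
  · rw [List.getElem?_append_right (by omega), hlen]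
    have ht : j - (s.length - (p + 1)) < p + 1 := by omega
    rw [List.getElem?_take_of_lt ht]
    have ht2 : p + 1 + j = s.length + (j - (s.length - (p + 1))) := by omega
    rw [ht2, Nat.add_mod_left, Nat.mod_eq_of_lt (by omega)]

-- ---- cw facts ----
lemma mem_cw (s : List Int) (i : Nat) : i ∈ cw s ↔ i < s.length ∧ wallB s i = true := by
  simp [cw, List.mem_filter, List.mem_range]

lemma cw_pairwise (s : List Int) : (cw s).Pairwise (· < ·) :=
  (List.pairwise_lt_range).filter _

-- ---- blockf in clean form ----
lemma blockf_step (s : List Int) (prev w : Nat) (hw : prev < w) (hwN : w < s.length) :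
    blockf s prev w = (s.getD ((prev + 1) % s.length) 0, (w : Int) - prev) := by
  have hst : (prev + 1) % s.length = prev + 1 := Nat.mod_eq_of_lt (by omega)
  rw [blockf]
  simp only [hst]
  rw [if_pos (by push_cast; omega)]
  congr 1
  push_cast
  omega

lemma blockf_last (s : List Int) (prev p : Nat) (hp : p ≤ prev) (hprev : prev < s.length) :
    blockf s prev p = (s.getD ((prev + 1) % s.length) 0, (s.length : Int) + p - prev) := by
  rw [blockf]
  rcases Nat.lt_or_ge (prev + 1) s.length with hlt | hge
  · have hst : (prev + 1) % s.length = prev + 1 := Nat.mod_eq_of_lt hlt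
    simp only [hst]
    rw [if_neg (by push_cast; omega)]
    congr 1
    push_cast
    omega
  · have hpe : prev + 1 = s.length := by omega
    have hst : (prev + 1) % s.length = 0 := by rw [hpe, Nat.mod_self]
    simp only [hst]
    rw [if_pos (by push_cast; omega)]
    congr 1
    push_cast
    omega

lemma wallB_false_eq (s : List Int) (i : Nat) (h : wallB s i = false) :
    s.getD i 0 = s.getD ((i + 1) % s.length) 0 := by
  simpa [wallB] using h

lemma rot_step (s : List Int) (p : Nat) (hpN : p < s.length) (j : Nat)
    (hj : j + 1 < s.length)
    (hnw : wallB s ((p + 1 + j) % s.length) = false) :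
    (rotA s p).getD j 0 = (rotA s p).getD (j + 1) 0 := by
  rw [rotA_getD s p hpN j (by omega), rotA_getD s p hpN (j + 1) (by omega)]
  have h1 := wallB_false_eq s ((p + 1 + j) % s.length) hnw
  rw [Nat.mod_add_mod] at h1
  rw [show p + 1 + j + 1 = p + 1 + (j + 1) from by omega] at h1
  exact h1

-- ---- the main invariant for A's segments ----
lemma ablocks_spec (s : List Int) (p : Nat) (hpN : p < s.length)
    (hlow : ∀ i, i < p → wallB s i = false) :
    ∀ (ws : List Nat) (prev : Nat), p ≤ prev → prev < s.length →
    List.IsChain (· < ·) (prev :: ws) →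
    (∀ w ∈ ws, w < s.length ∧ wallB s w = true) →
    (∀ i, prev < i → i < s.length → wallB s i = true → i ∈ ws) →
    flatB (ablocks s p prev ws) = (rotA s p).drop (prev - p)
    ∧ (ablocks s p prev ws).IsChain (fun a b => a.1 ≠ b.1)
    ∧ (ablocks s p prev ws).head?.map Prod.fst = some (s.getD ((prev + 1) % s.length) 0)
    ∧ ∀ b ∈ ablocks s p prev ws, 1 ≤ b.2 := by
  intro ws
  induction ws with
  | nil =>
    intro prev hppr hprN _u1 _u2 hcomp
    have hnw : ∀ j, prev - p ≤ j → j + 1 < s.length →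
        wallB s ((p + 1 + j) % s.length) = false := by
      intro j hja hjb
      rcases Nat.lt_or_ge (p + 1 + j) s.length with hc | hc
      · rw [Nat.mod_eq_of_lt hc]
        by_contra hcon
        exact absurd (hcomp (p + 1 + j) (by omega) (by omega)
          (by simpa using hcon)) (by simp)
      · rw [Nat.mod_eq_sub_mod hc, Nat.mod_eq_of_lt (by omega)]
        exact hlow _ (by omega)
    have hdr := dropRepl (rotA s p) (prev - p) s.length (by omega)
      (by rw [rotA_length s p hpN])
      (fun j hja hjb => rot_step s p hpN j hjb (hnw j hja hjb))
    rw [show List.drop s.length (rotA s p) = [] from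
      List.drop_of_length_le (by rw [rotA_length s p hpN]), List.append_nil] at hdr
    have hval : (rotA s p).getD (prev - p) 0 = s.getD ((prev + 1) % s.length) 0 := by
      rw [rotA_getD s p hpN (prev - p) (by omega),
        show p + 1 + (prev - p) = prev + 1 from by omega]
    refine ⟨?_, ?_, ?_, ?_⟩
    · rw [ablocks, blockf_last s prev p hppr hprN]
      simp only [flatB, List.flatMap_cons, List.flatMap_nil, List.append_nil]
      rw [hdr, hval]
      congr 1
      omega
    · rw [ablocks]
      exact List.isChain_singleton _
    · rw [ablocks, blockf_last s prev p hppr hprN]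
      rfl
    · intro b hb
      rw [ablocks, blockf_last s prev p hppr hprN] at hb
      simp at hb
      rw [hb]
      simp only []
      omega
  | cons w t ih =>
    intro prev hppr hprN hchain hmem hcomp
    have hpw : prev < w := (List.isChain_cons_cons.1 hchain).1
    have hwprops := hmem w (by simp)
    have hwN : w < s.length := hwprops.1
    have hsorted : ∀ i ∈ t, w < i := by
      have hpair := List.isChain_iff_pairwise.1 (List.isChain_cons_cons.1 hchain).2
      intro i hi
      exact List.rel_of_pairwise_cons hpair hi
    have hIH := ih w (by omega) hwN (List.isChain_cons_cons.1 hchain).2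
      (fun x hx => hmem x (by simp [hx]))
      (fun i hi1 hi2 hi3 => by
        rcases List.mem_cons.1 (hcomp i (by omega) hi2 hi3) with h | h
        · omega
        · exact h)
    obtain ⟨ihflat, ihchain, ihhead, ihpos⟩ := hIH
    -- no wall strictly between prev and w
    have hnw : ∀ j, prev - p ≤ j → j + 1 < w - p →
        wallB s ((p + 1 + j) % s.length) = false := by
      intro j hja hjb
      have hc : p + 1 + j < s.length := by omega
      rw [Nat.mod_eq_of_lt hc]
      by_contra hcon
      have hmem' := hcomp (p + 1 + j) (by omega) (by omega) (by simpa using hcon)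
      rcases List.mem_cons.1 hmem' with h | h
      · omega
      · have := hsorted _ h
        omega
    have hdr := dropRepl (rotA s p) (prev - p) (w - p) (by omega)
      (by rw [rotA_length s p hpN]; omega)
      (fun j hja hjb => rot_step s p hpN j (by omega) (hnw j hja hjb))
    have hval : (rotA s p).getD (prev - p) 0 = s.getD ((prev + 1) % s.length) 0 := by
      rw [rotA_getD s p hpN (prev - p) (by omega),
        show p + 1 + (prev - p) = prev + 1 from by omega]
    -- value constant up to the wall w, so A's first value equals s[w]
    have hvw : s.getD ((prev + 1) % s.length) 0 = s.getD w 0 := by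
      have hcE := constEq (rotA s p) (prev - p) (w - p)
        (fun j hja hjb => rot_step s p hpN j (by omega) (hnw j hja hjb))
        (w - p - 1) (by omega) (by omega)
      rw [rotA_getD s p hpN (w - p - 1) (by omega),
        show p + 1 + (w - p - 1) = w from by omega, Nat.mod_eq_of_lt hwN] at hcE
      rw [hcE, hval]
    have hwall : s.getD w 0 ≠ s.getD ((w + 1) % s.length) 0 := by
      have := hwprops.2
      simpa [wallB] using this
    refine ⟨?_, ?_, ?_, ?_⟩
    · rw [ablocks, blockf_step s prev w hpw hwN]
      rw [show flatB ((s.getD ((prev + 1) % s.length) 0, (w : Int) - (prev : Int))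
            :: ablocks s p w t)
          = List.replicate ((w : Int) - (prev : Int)).toNat
              (s.getD ((prev + 1) % s.length) 0) ++ flatB (ablocks s p w t) from
        flatB_cons _ _ _]
      rw [ihflat, hdr, hval]
      congr 2
      omega
    · rw [ablocks]
      refine ihchain.cons ?_
      intro y hy
      have hyv : y.1 = s.getD ((w + 1) % s.length) 0 := by
        cases hh : (ablocks s p w t).head? with
        | none => rw [hh] at hy; simp at hy
        | some z =>
          rw [hh] at hy ihhead
          simp at hy ihhead
          subst hy
          exact ihhead
      rw [blockf_step s prev w hpw hwN]
      simp only [hyv]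
      rw [hvw]
      exact hwall
    · rw [ablocks, blockf_step s prev w hpw hwN]
      rfl
    · intro b hb
      rw [ablocks] at hb
      rcases List.mem_cons.1 hb with hb | hb
      · rw [hb, blockf_step s prev w hpw hwN]
        simp only []
        omega
      · exact ihpos b hb

-- ---- bridging the ports ----
lemma pred_eq (s : List Int) (i : Nat) (hi : i < s.length) :
    (decide (PySem.List.pyGet? s (i : Int)
      ≠ PySem.List.pyGet? s (PySem.Int.mod ((i : Int) + 1) (s.length : Int)))) = wallB s i := by
  have hmlt : (i + 1) % s.length < s.length := Nat.mod_lt _ (by omega)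
  have h1 : PySem.List.pyGet? s (i : Int) = some s[i] := by
    rw [PySem.List.pyGet?_natCast, List.getElem?_eq_getElem hi]
  have hc : ((i : Int) + 1) = (((i + 1 : Nat)) : Int) := by push_cast; ring
  have h2 : PySem.List.pyGet? s (PySem.Int.mod ((i : Int) + 1) (s.length : Int))
      = some s[(i + 1) % s.length] := by
    rw [hc, PySem.Int.mod_natCast, PySem.List.pyGet?_natCast, List.getElem?_eq_getElem hmlt]
  rw [h1, h2, wallB]
  have g1 : s.getD i 0 = s[i] := by
    simp [List.getD_eq_getElem?_getD, List.getElem?_eq_getElem hi]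
  have g2 : s.getD ((i + 1) % s.length) 0 = s[(i + 1) % s.length] := by
    simp [List.getD_eq_getElem?_getD, List.getElem?_eq_getElem hmlt]
  rw [g1, g2]
  simp

lemma walls_eq (s : List Int) :
    (PySem.List.pyRange 0 (s.length : Int) 1).filter
      (fun i => decide (PySem.List.pyGet? s i
        ≠ PySem.List.pyGet? s (PySem.Int.mod (i + 1) (s.length : Int))))
    = List.map (Nat.cast : Nat → Int) (cw s) := by
  rw [PySem.List.pyRange_one]
  simp only [Int.sub_zero, Int.toNat_natCast, Int.zero_add]
  rw [List.filter_map, cw]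
  refine congrArg (List.map _) (List.filter_congr ?_)
  intro i hi
  simp only [Function.comp]
  exact pred_eq s i (List.mem_range.1 hi)

lemma find_eq (s : List Int) :
    (PySem.List.pyRange 0 (s.length : Int) 1).find?
      (fun i => decide (PySem.List.pyGet? s i
        ≠ PySem.List.pyGet? s (PySem.Int.mod (i + 1) (s.length : Int))))
    = Option.map (Nat.cast : Nat → Int) (cw s).head? := by
  rw [PySem.List.pyRange_one]
  simp only [Int.sub_zero, Int.toNat_natCast, Int.zero_add]
  rw [List.find?_map, find?_eq_head?_filter, cw]
  refine congrArg (Option.map _) (congrArg List.head? (List.filter_congr ?_))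
  intro i hi
  simp only [Function.comp]
  exact pred_eq s i (List.mem_range.1 hi)

lemma zip_blocks (s : List Int) (p : Nat) :
    ∀ (t : List Nat) (prev : Nat),
    ((prev :: t).zip (t ++ [p])).map (fun q => blockf s q.1 q.2) = ablocks s p prev t := by
  intro t
  induction t with
  | nil => intro prev; simp [ablocks]
  | cons w t' ih =>
    intro prev
    rw [List.cons_append, List.zip_cons_cons, List.map_cons, ablocks, ih w]

lemma cyc_map (s : List Int) (W : List Nat) (hW : 0 < W.length) :
    (List.range W.length).map
      (fun k => blockf s (W.getD k 0) (W.getD ((k + 1) % W.length) 0))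
    = (W.zip (W.rotate 1)).map (fun q => blockf s q.1 q.2) := by
  apply List.ext_getElem
  · simp
  · intro k h1 h2
    simp only [List.getElem_map, List.getElem_range, List.getElem_zip]
    have hk : k < W.length := by simpa using h1
    have hk2 : k < (W.rotate 1).length := by simpa using hk
    have hrot : (W.rotate 1)[k]'hk2
        = W[(k + 1) % W.length]'(Nat.mod_lt _ hW) := by
      rw [List.getElem_rotate]
    have g1 : W.getD k 0 = W[k] := by
      simp [List.getD_eq_getElem?_getD, List.getElem?_eq_getElem hk]
    have g2 : W.getD ((k + 1) % W.length) 0 = W[(k + 1) % W.length]'(Nat.mod_lt _ hW) := by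
      simp [List.getD_eq_getElem?_getD, List.getElem?_eq_getElem (Nat.mod_lt _ hW)]
    rw [g1, g2, hrot]

lemma portA_uniform (s : List Int) (hs : s ≠ []) (h : cw s = []) :
    spatial_segments s = match s with | [] => [] | x :: _ => [(x, (s.length : Int))] := by
  unfold spatial_segments
  simp only [walls_eq s, h, List.map_nil]
  cases s with
  | nil => exact absurd rfl hs
  | cons x t => simp

lemma portA_walls (s : List Int) (p : Nat) (ws : List Nat) (h : cw s = p :: ws) :
    spatial_segments s = ablocks s p p ws := by
  unfold spatial_segments
  simp only [walls_eq s, h, List.map_cons]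
  rw [if_neg (by simp)]
  rw [PySem.List.foldl_append_singleton_eq_map, List.nil_append]
  have hmap : ((p : Int) :: List.map (Nat.cast : Nat → Int) ws)
      = List.map (Nat.cast : Nat → Int) (p :: ws) := by simp
  simp only [hmap, List.length_map]
  rw [PySem.List.pyRange_one]
  simp only [Int.sub_zero, Int.toNat_natCast, Int.zero_add, List.map_map]
  have hW : 0 < (p :: ws).length := by simp
  rw [← zip_blocks s p ws p,
    ← show (p :: ws).rotate 1 = ws ++ [p] from by
      rw [List.rotate_cons_succ, List.rotate_zero],
    ← cyc_map s (p :: ws) hW]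
  apply List.map_congr_left
  intro k hk
  have hkW : k < (p :: ws).length := List.mem_range.1 hk
  have hmod : (k + 1) % (p :: ws).length < (p :: ws).length := Nat.mod_lt _ hW
  have hg : ∀ (j : Nat), j < (p :: ws).length →
      PySem.List.pyGetD (List.map (Nat.cast : Nat → Int) (p :: ws)) (j : Int) 0
      = (((p :: ws).getD j 0 : Nat) : Int) := by
    intro j hj
    rw [PySem.List.pyGetD_natCast, List.getD_eq_getElem?_getD,
      List.getElem?_map, List.getElem?_eq_getElem hj, List.getD_eq_getElem?_getD,
      List.getElem?_eq_getElem hj]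
    rfl
  have hidx : PySem.Int.mod ((k : Int) + 1) (((p :: ws).length : Nat) : Int)
      = (((k + 1) % (p :: ws).length : Nat) : Int) := by
    rw [show ((k : Int) + 1) = (((k + 1 : Nat)) : Int) from by push_cast; ring,
      PySem.Int.mod_natCast]
  have hg2 : ∀ (j : Nat), j < (p :: ws).length →
      (List.map (Nat.cast : Nat → Int) (p :: ws)).getD j 0
      = (((p :: ws).getD j 0 : Nat) : Int) := by
    intro j hj
    rw [List.getD_eq_getElem?_getD, List.getElem?_map,
      List.getElem?_eq_getElem hj, List.getD_eq_getElem?_getD,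
      List.getElem?_eq_getElem hj]
    rfl
  have hstmod : PySem.Int.mod ((((p :: ws).getD k 0 : Nat) : Int) + 1) (s.length : Int)
      = ((((p :: ws).getD k 0 + 1) % s.length : Nat) : Int) := by
    rw [show ((((p :: ws).getD k 0 : Nat) : Int) + 1)
        = ((((p :: ws).getD k 0 + 1 : Nat)) : Int) from by push_cast; ring,
      PySem.Int.mod_natCast]
  simp only [Function.comp, PySem.List.pyGetD_natCast, hidx, hg2 k hkW, hg2 _ hmod,
    hstmod, blockf]

lemma portB_uniform (s : List Int) (hs : s ≠ []) (h : cw s = []) :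
    spatial_segments_alt s = match s with | [] => [] | x :: _ => [(x, (s.length : Int))] := by
  unfold spatial_segments_alt
  simp only [find_eq s, h, List.head?_nil, Option.map_none]
  cases s with
  | nil => exact absurd rfl hs
  | cons x t => simp

lemma portB_walls (s : List Int) (p : Nat) (ws : List Nat) (h : cw s = p :: ws) :
    spatial_segments_alt s = match rotA s p with | [] => [] | v :: rest => runsLoop rest v 1 [] := by
  unfold spatial_segments_alt
  simp only [find_eq s, h, List.head?_cons, Option.map_some]
  have hs1 : PySem.List.slice s (some ((p : Int) + 1)) none = s.drop (p + 1) := by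
    rw [show ((p : Int) + 1) = (((p + 1 : Nat)) : Int) from by push_cast; ring,
      PySem.List.slice_from_natCast]
  have hs2 : PySem.List.slice s none (some ((p : Int) + 1)) = s.take (p + 1) := by
    rw [show ((p : Int) + 1) = (((p + 1 : Nat)) : Int) from by push_cast; ring,
      PySem.List.slice_to_natCast]
  rw [hs1, hs2]
  rfl

-- ===== VERDICT (by name: the statement is the Claim_ definition above) =====
theorem spatial_segments_spec : Claim_equal_spatial_segments := by
  intro state _hdom hpre
  unfold Spec_spatial_segments
  cases hcw : cw state with
  | nil =>
    rw [portA_uniform state hpre hcw, portB_uniform state hpre hcw]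
  | cons p ws =>
    have hp : p ∈ cw state := by rw [hcw]; exact List.mem_cons_self
    have hpN : p < state.length := ((mem_cw state p).1 hp).1
    have hpair : (p :: ws).Pairwise (· < ·) := by
      rw [← hcw]; exact cw_pairwise state
    have hlow : ∀ i, i < p → wallB state i = false := by
      intro i hip
      by_contra hcon
      have hi : i ∈ cw state := (mem_cw state i).2 ⟨by omega, by simpa using hcon⟩
      rw [hcw] at hi
      rcases List.mem_cons.1 hi with h | h
      · omega
      · have := (List.pairwise_cons.1 hpair).1 i h
        omega
    have hspec := ablocks_spec state p hpN hlow ws p le_rfl hpN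
      (List.isChain_iff_pairwise.2 hpair)
      (fun w hw => (mem_cw state w).1 (by rw [hcw]; exact List.mem_cons_of_mem _ hw))
      (fun i hi1 hi2 hi3 => by
        have hi : i ∈ cw state := (mem_cw state i).2 ⟨hi2, hi3⟩
        rw [hcw] at hi
        rcases List.mem_cons.1 hi with h | h
        · omega
        · exact h)
    obtain ⟨hflat, hchain, _hhead, hpos⟩ := hspec
    rw [Nat.sub_self, List.drop_zero] at hflat
    cases hr : rotA state p with
    | nil =>
      have := rotA_length state p hpN
      rw [hr] at this
      simp at this
      omega
    | cons v rest =>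
      rw [portA_walls state p ws hcw, portB_walls state p ws hcw, hr]
      apply decomp_unique _ _ hchain (runsLoop_chain rest v 1)
        hpos (runsLoop_pos rest v 1 le_rfl)
      rw [hflat, hr, runsLoop_flat rest v 1 le_rfl]
      rfl
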